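-- pv_equiv track=rewrite | github.com/speedypleath/midi_generator | midi_generator/syncopation.py | generators
-- ===== SOURCE A (Python) =====
-- def generators(n):
--     s = set(range(1, n))
--     results = []
--     for a in s:
--         g = set()
--         for x in s:
--             g.add((a * x) % n)
--         if g == s:
--             results.append(a)
--     return results
-- ===== SOURCE B (Python) =====
-- def generators(n):
--     # a*x mod n permutes {1..n-1} iff gcd(a, n) == 1: test each a with Euclid's
--     # algorithm instead of rebuilding the image set.
--     results = []
--     for a in range(1, n):
--         x, y = a, n
--         while y:
--             x, y = y, x % y
--         if x == 1:
--             results.append(a)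
--     return results
-- ===== Notes on version B (the rewrite author's own statement) =====
-- stated objective: faster
-- what changed: Instead of building the image set {a*x mod n} for every a and comparing it with {1..n-1}, B tests each a with Euclid's gcd algorithm (a generates iff gcd(a,n)=1).
import Mathlib
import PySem

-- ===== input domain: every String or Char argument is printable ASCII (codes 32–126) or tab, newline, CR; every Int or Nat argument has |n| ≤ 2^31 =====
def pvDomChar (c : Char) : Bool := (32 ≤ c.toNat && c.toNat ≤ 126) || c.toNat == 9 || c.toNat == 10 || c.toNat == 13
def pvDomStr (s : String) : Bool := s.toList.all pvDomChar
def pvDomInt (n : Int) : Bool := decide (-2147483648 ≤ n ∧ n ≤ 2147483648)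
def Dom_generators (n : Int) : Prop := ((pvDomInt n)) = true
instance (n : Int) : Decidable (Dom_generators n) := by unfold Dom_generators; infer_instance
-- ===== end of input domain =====

-- B replaces A's per-candidate image-set construction by a gcd test (a generates iff gcd(a,n)=1).

-- ===== PORT A =====
-- A iterates over set(range(1, n)); CPython iterates such a set in increasing order.
def generators (n : Int) : List Int :=
  let s : PySem.Set Int := PySem.Set.ofList (PySem.List.pyRange 1 n 1)
  s.foldl (fun results a =>
    let g : PySem.Set Int :=
      s.foldl (fun g x => PySem.Set.add g (PySem.Int.mod (a * x) n)) PySem.Set.empty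
    if PySem.Set.equal g s then results ++ [a] else results) []

-- ===== PORT B =====
-- termination fact for the Euclid loop (cited by gcdLoop's decreasing_by)
theorem pvModNatAbsLt (x y : Int) (h : ¬ y = 0) :
    (PySem.Int.mod x y).natAbs < y.natAbs := by
  rcases lt_or_gt_of_ne h with hy | hy
  · have := PySem.Int.mod_neg_bounds x hy
    omega
  · have h1 := PySem.Int.mod_nonneg x hy
    have h2 := PySem.Int.mod_lt x hy
    omega

-- 'x, y = a, n; while y: x, y = y, x % y'
def gcdLoop (x y : Int) : Int :=
  if h : y = 0 then x else gcdLoop y (PySem.Int.mod x y)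
termination_by y.natAbs
decreasing_by exact pvModNatAbsLt x y h

def generators_alt (n : Int) : List Int :=
  (PySem.List.pyRange 1 n 1).foldl (fun results a =>
    if gcdLoop a n == 1 then results ++ [a] else results) []

-- ===== PRECONDITION & SPEC =====
def Spec_generators (n : Int) (out : List Int) : Prop := out = generators_alt n
instance (n : Int) (out : List Int) : Decidable (Spec_generators n out) := by unfold Spec_generators; infer_instance

-- ===== CLAIM (what is proved, stated in full; the proofs are below) =====
def Claim_equal_generators : Prop := ∀ (n : Int), Dom_generators n → Spec_generators n (generators n)

-- ===== LEMMAS AND PROOFS =====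

-- Euclid's loop computes Int.gcd on nonnegative inputs
theorem gcdLoop_eq_gcd (x y : Int) (hx : 0 ≤ x) (hy : 0 ≤ y) :
    gcdLoop x y = (Int.gcd x y : Int) := by
  by_cases h : y = 0
  · subst h
    rw [gcdLoop]
    simp [Int.gcd, Int.natAbs_of_nonneg hx]
  · have hypos : 0 < y := lt_of_le_of_ne hy (Ne.symm h)
    have hm : PySem.Int.mod x y = x % y := PySem.Int.mod_eq_emod_of_pos hypos
    rw [gcdLoop]
    simp only [h, dite_false]
    rw [gcdLoop_eq_gcd y (PySem.Int.mod x y) hy (by rw [hm]; exact Int.emod_nonneg x h)]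
    rw [hm, Int.gcd_comm, Int.gcd_emod]
termination_by y.natAbs
decreasing_by exact pvModNatAbsLt x y h

-- if the image of {1..n-1} under x ↦ (a*x) % n lands inside {1..n-1} injectively,
-- membership characterisation of the image list
theorem image_sub (n a : Int) (ha : 1 ≤ a) (han : a < n) (hg : Int.gcd a n = 1) :
    ∀ z ∈ (PySem.List.pyRange 1 n 1).map (fun x => PySem.Int.mod (a * x) n),
      z ∈ PySem.List.pyRange 1 n 1 := by
  have hn : 0 < n := by omega
  intro z hz
  obtain ⟨x, hx, rfl⟩ := List.mem_map.mp hz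
  obtain ⟨hx1, hx2⟩ := PySem.List.mem_pyRange_one.mp hx
  rw [PySem.Int.mod_eq_emod_of_pos hn]
  rw [PySem.List.mem_pyRange_one]
  have hub : (a * x) % n < n := Int.emod_lt_of_pos _ hn
  have hlb : 0 ≤ (a * x) % n := Int.emod_nonneg _ (by omega)
  have hne : (a * x) % n ≠ 0 := by
    intro h0
    have hdvd : n ∣ a * x := Int.dvd_of_emod_eq_zero h0
    have hgc : Int.gcd n a = 1 := by rw [Int.gcd_comm]; exact hg
    have : n ∣ x := Int.dvd_of_dvd_mul_left_of_gcd_one (by rwa [mul_comm] at hdvd) hgc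
    have := Int.le_of_dvd (by omega) this
    omega
  omega

-- the image of {1..n-1} under x ↦ (a*x) % n is {1..n-1} again  ↔  gcd(a,n) = 1
theorem perm_iff_gcd (n a : Int) (ha : 1 ≤ a) (han : a < n) :
    ((∀ y, y ∈ (PySem.List.pyRange 1 n 1).map (fun x => PySem.Int.mod (a * x) n) ↔
        y ∈ PySem.List.pyRange 1 n 1) ↔ Int.gcd a n = 1) := by
  have hn : 0 < n := by omega
  constructor
  · intro h
    have h1 : (1 : Int) ∈ PySem.List.pyRange 1 n 1 :=
      PySem.List.mem_pyRange_one.mpr ⟨le_refl 1, by omega⟩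
    obtain ⟨x, hx, hfx⟩ := List.mem_map.mp ((h 1).mpr h1)
    rw [PySem.Int.mod_eq_emod_of_pos hn] at hfx
    have hd : n ∣ a * x - 1 := by
      have hdm := Int.emod_add_mul_ediv (a * x) n
      exact ⟨a * x / n, by omega⟩
    have gda : (Int.gcd a n : Int) ∣ a := Int.gcd_dvd_left a n
    have gdn : (Int.gcd a n : Int) ∣ n := Int.gcd_dvd_right a n
    have hax : (Int.gcd a n : Int) ∣ a * x := gda.mul_right x
    have hax1 : (Int.gcd a n : Int) ∣ a * x - 1 := gdn.trans hd
    have h1' : (Int.gcd a n : Int) ∣ 1 := by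
      have := dvd_sub hax hax1
      simpa using this
    have : Int.gcd a n ∣ 1 := by exact_mod_cast h1'
    exact Nat.dvd_one.mp this
  · intro hg y
    have hsub := image_sub n a ha han hg
    constructor
    · exact hsub y
    · intro hy
      -- injectivity of x ↦ (a*x) % n on {1..n-1}
      have hgc : Int.gcd n a = 1 := by rw [Int.gcd_comm]; exact hg
      have hinj : ∀ x₁ ∈ PySem.List.pyRange 1 n 1, ∀ x₂ ∈ PySem.List.pyRange 1 n 1,
          PySem.Int.mod (a * x₁) n = PySem.Int.mod (a * x₂) n → x₁ = x₂ := by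
        intro x₁ hx₁ x₂ hx₂ he
        obtain ⟨h11, h12⟩ := PySem.List.mem_pyRange_one.mp hx₁
        obtain ⟨h21, h22⟩ := PySem.List.mem_pyRange_one.mp hx₂
        rw [PySem.Int.mod_eq_emod_of_pos hn, PySem.Int.mod_eq_emod_of_pos hn] at he
        have hdvd : n ∣ a * x₂ - a * x₁ := Int.ModEq.dvd he
        have hdvd' : n ∣ (x₂ - x₁) * a := by
          have : a * x₂ - a * x₁ = (x₂ - x₁) * a := by ring
          rwa [this] at hdvd
        have hdx : n ∣ x₂ - x₁ := Int.dvd_of_dvd_mul_left_of_gcd_one hdvd' hgc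
        by_contra hne
        have habs : n ∣ |x₂ - x₁| := (dvd_abs n _).mpr hdx
        have hpos : 0 < |x₂ - x₁| := by
          rw [abs_pos]
          omega
        have hlt : |x₂ - x₁| < n := abs_sub_lt_iff.mpr ⟨by omega, by omega⟩
        exact absurd (Int.le_of_dvd hpos habs) (not_le.mpr hlt)
      -- counting: image ⊆ range, nodup, same length ⇒ same members
      have hnodL : (PySem.List.pyRange 1 n 1).Nodup := PySem.List.nodup_pyRange_one 1 n
      have hnodM : ((PySem.List.pyRange 1 n 1).map
          (fun x => PySem.Int.mod (a * x) n)).Nodup := hnodL.map_on hinj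
      have hfs : ((PySem.List.pyRange 1 n 1).map
          (fun x => PySem.Int.mod (a * x) n)).toFinset = (PySem.List.pyRange 1 n 1).toFinset := by
        apply Finset.eq_of_subset_of_card_le
        · intro z hz
          rw [List.mem_toFinset] at hz ⊢
          exact hsub z hz
        · rw [List.toFinset_card_of_nodup hnodM, List.toFinset_card_of_nodup hnodL,
            List.length_map]
      have : y ∈ ((PySem.List.pyRange 1 n 1).map
          (fun x => PySem.Int.mod (a * x) n)).toFinset := by
        rw [hfs, List.mem_toFinset]
        exact hy
      rwa [List.mem_toFinset] at this
  
-- A's per-candidate set test equals B's gcd test, for every a in the iterated range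
theorem cond_eq (n a : Int) (ha : a ∈ PySem.List.pyRange 1 n 1) :
    PySem.Set.equal
      ((PySem.List.pyRange 1 n 1).foldl
        (fun g x => PySem.Set.add g (PySem.Int.mod (a * x) n)) PySem.Set.empty)
      (PySem.List.pyRange 1 n 1)
    = (gcdLoop a n == 1) := by
  obtain ⟨ha1, ha2⟩ := PySem.List.mem_pyRange_one.mp ha
  have hG : (PySem.List.pyRange 1 n 1).foldl
      (fun g x => PySem.Set.add g (PySem.Int.mod (a * x) n)) PySem.Set.empty
      = PySem.Set.ofList ((PySem.List.pyRange 1 n 1).map (fun x => PySem.Int.mod (a * x) n)) := by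
    rw [← PySem.Set.update_map_eq_foldl_add]
    exact PySem.Set.update_empty _
  rw [hG]
  have hgcd : gcdLoop a n = (Int.gcd a n : Int) := gcdLoop_eq_gcd a n (by omega) (by omega)
  rw [Bool.eq_iff_iff, PySem.Set.equal_iff, beq_iff_eq, hgcd]
  have : ((Int.gcd a n : Int) = 1) ↔ Int.gcd a n = 1 := by exact_mod_cast Iff.rfl
  rw [this, ← perm_iff_gcd n a ha1 ha2]
  constructor
  · intro h y
    rw [← h y, PySem.Set.mem_ofList]
  · intro h y
    rw [PySem.Set.mem_ofList]
    exact h y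

-- ===== VERDICT (by name: the statement is the Claim_ definition above) =====
theorem generators_spec : Claim_equal_generators := by
  intro n _
  unfold Spec_generators generators generators_alt
  rw [PySem.Set.ofList_eq_self_of_nodup _ (PySem.List.nodup_pyRange_one 1 n)]
  apply PySem.List.foldl_congr_mem
  intro acc a ha
  simp only [cond_eq n a ha]
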